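-- pv_equiv track=rewrite | github.com/chikitpao/AdventOfCode2023 | Day13/Day13.py | __find_smudge_mirror_ex
-- ===== SOURCE A (Python) =====
-- def __find_smudge_mirror_ex(values, old_value):
--     result = []
--     for i in range(len(values) - 1):
--         items_to_check = min(i + 1, len(values) - i - 1)
--         lhs = list(reversed(values[i - items_to_check + 1 : i + 1]))
--         rhs = values[i + 1 : i + 1 + items_to_check]
--         xor = list(
--             filter(lambda x: x > 0, [lhs[i] ^ rhs[i] for i in range(len(rhs))])
--         )
--         if len(xor) == 1 and bin(xor[0]).count("1") == 1:
--             if i != old_value: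
--                 result.append(i)
--     return result
-- ===== SOURCE B (Python) =====
-- def __find_smudge_mirror_ex(values, old_value):
--     # Two pointers walking outward from each candidate mirror line, keeping a
--     # single popcount accumulator instead of building reversed/sliced lists.
--     result = []
--     n = len(values)
--     for i in range(n - 1):
--         total = 0
--         j, k = i, i + 1
--         while j >= 0 and k < n:
--             d = values[j] ^ values[k]
--             if d > 0:
--                 total += bin(d).count("1")
--             j -= 1
--             k += 1
--         if total == 1 and i != old_value:
--             result.append(i)
--     return result
-- ===== Notes on version B (the rewrite author's own statement) =====
-- stated objective: simpler
-- what changed: Per mirror line, A builds a reversed left slice, a right slice and a filtered list of xor values and then tests that list; B walks two pointers outward from the line and keeps a single popcount accumulator, appending the line when the accumulated popcount is exactly 1 and i != old_value, with no intermediate lists.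
import Mathlib
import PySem

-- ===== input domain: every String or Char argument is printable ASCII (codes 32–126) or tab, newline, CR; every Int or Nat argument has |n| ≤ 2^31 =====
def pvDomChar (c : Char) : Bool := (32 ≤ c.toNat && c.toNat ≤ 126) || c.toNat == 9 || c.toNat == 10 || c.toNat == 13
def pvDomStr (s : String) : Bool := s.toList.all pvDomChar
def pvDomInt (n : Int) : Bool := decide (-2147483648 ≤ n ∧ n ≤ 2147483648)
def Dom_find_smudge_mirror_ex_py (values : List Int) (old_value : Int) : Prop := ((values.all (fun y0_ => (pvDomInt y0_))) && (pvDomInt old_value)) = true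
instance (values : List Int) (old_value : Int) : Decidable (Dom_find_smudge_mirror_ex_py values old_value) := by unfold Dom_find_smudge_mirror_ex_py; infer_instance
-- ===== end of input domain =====

-- B replaces A's per-line building of reversed/sliced lists and a filtered xor list by two
-- pointers walking outward from the candidate mirror line with a single popcount
-- accumulator (objective: simpler — no intermediate lists).

-- ===== PORT A =====
-- Literal transliteration of __find_smudge_mirror_ex.
-- `bin(x).count("1")` is PySem.Int.bitCount (exact here: it is applied only to xor[0],
-- which the filter guarantees is > 0); lhs[i]/rhs[i] are always in range (both lists
-- have length items_to_check), so pyGetD with default 0 is exact.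
def find_smudge_mirror_ex_py (values : List Int) (old_value : Int) : List Int :=
  (PySem.List.pyRange 0 ((values.length : Int) - 1) 1).foldl (fun result i =>
    let items_to_check : Int := min (i + 1) ((values.length : Int) - i - 1)
    let lhs : List Int :=
      (PySem.List.slice values (some (i - items_to_check + 1)) (some (i + 1))).reverse
    let rhs : List Int := PySem.List.slice values (some (i + 1)) (some (i + 1 + items_to_check))
    let xor : List Int :=
      ((PySem.List.pyRange 0 ((rhs.length : Int)) 1).map
        (fun t => PySem.Int.bxor (PySem.List.pyGetD lhs t 0) (PySem.List.pyGetD rhs t 0))).filter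
        (fun x => decide (0 < x))
    if xor.length = 1 ∧ PySem.Int.bitCount (PySem.List.pyGetD xor 0 0) = 1 then
      if i ≠ old_value then result ++ [i] else result
    else result) []

-- ===== PORT B =====
-- the inner `while j >= 0 and k < n:` loop of Source B (j, k, total are the loop state;
-- `bin(d).count("1")` for d > 0 is PySem.Int.bitCount, as in the A port)
def pvPairTotal (values : List Int) (j k total : Int) : Int :=
  if h : 0 ≤ j ∧ k < (values.length : Int) then
    let d := PySem.Int.bxor (PySem.List.pyGetD values j 0) (PySem.List.pyGetD values k 0)
    pvPairTotal values (j - 1) (k + 1)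
      (if 0 < d then total + (PySem.Int.bitCount d : Int) else total)
  else total
termination_by ((values.length : Int) - k).toNat
decreasing_by omega

def find_smudge_mirror_ex_py_alt (values : List Int) (old_value : Int) : List Int :=
  let n : Int := values.length
  (PySem.List.pyRange 0 (n - 1) 1).foldl (fun result i =>
    let total := pvPairTotal values i (i + 1) 0
    if total = 1 ∧ i ≠ old_value then result ++ [i] else result) []

-- ===== PRECONDITION & SPEC =====
def Spec_find_smudge_mirror_ex_py (values : List Int) (old_value : Int) (out : List Int) : Prop := out = find_smudge_mirror_ex_py_alt values old_value
instance (values : List Int) (old_value : Int) (out : List Int) : Decidable (Spec_find_smudge_mirror_ex_py values old_value out) := by unfold Spec_find_smudge_mirror_ex_py; infer_instance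

-- ===== CLAIM (what is proved, stated in full; the proofs are below) =====
def Claim_equal_find_smudge_mirror_ex_py : Prop := ∀ (values : List Int) (old_value : Int), Dom_find_smudge_mirror_ex_py values old_value → Spec_find_smudge_mirror_ex_py values old_value (find_smudge_mirror_ex_py values old_value)

-- ===== LEMMAS AND PROOFS =====

-- bin(x).count("1") is positive for positive x
lemma pv_bitCount_pos : ∀ (N : Nat) (x : Int), x.toNat ≤ N → 0 < x → 0 < PySem.Int.bitCount x := by
  intro N
  induction N with
  | zero => intro x h hx; omega
  | succ N ih =>
    intro x h hx
    rw [PySem.Int.bitCount_of_pos hx]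
    have h2 : PySem.Int.mod x 2 = 0 ∨ PySem.Int.mod x 2 = 1 := by
      have := PySem.Int.mod_nonneg x (b := 2) (by norm_num)
      have := PySem.Int.mod_lt x (b := 2) (by norm_num)
      omega
    rcases h2 with h2 | h2
    · have hdvd : (2 : Int) ∣ x := (PySem.Int.mod_eq_zero_iff_dvd x 2).mp h2
      have hfd : PySem.Int.floordiv x 2 = x / 2 := PySem.Int.floordiv_eq_ediv_of_pos (by norm_num)
      have hpos : 0 < PySem.Int.bitCount (PySem.Int.floordiv x 2) := by
        apply ih _ (by rw [hfd]; omega) (by rw [hfd]; omega)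
      omega
    · omega

-- the summand of B's accumulator
def pvTerm (x : Int) : Int := if 0 < x then (PySem.Int.bitCount x : Int) else 0

lemma pv_term_nonneg (x : Int) : 0 ≤ pvTerm x := by
  unfold pvTerm; split <;> positivity

lemma pv_sum_zero_iff (l : List Int) :
    (l.map pvTerm).sum = 0 ↔ l.filter (fun x => decide (0 < x)) = [] := by
  induction l with
  | nil => simp
  | cons x l ih =>
    by_cases hx : 0 < x
    · have hbc : 0 < PySem.Int.bitCount x := pv_bitCount_pos x.toNat x le_rfl hx
      have hs : 0 ≤ (l.map pvTerm).sum := List.sum_nonneg (by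
        intro a ha; obtain ⟨b, _, rfl⟩ := List.mem_map.mp ha; exact pv_term_nonneg b)
      simp [pvTerm, hx]
      omega
    · simpa [pvTerm, hx] using ih

-- A's per-line condition (exactly one positive xor, with exactly one set bit)
-- is "accumulated popcount over the pairs = 1"
lemma pv_cond_iff (l : List Int) :
    ((l.filter (fun x => decide (0 < x))).length = 1 ∧
      PySem.Int.bitCount ((l.filter (fun x => decide (0 < x))).getD 0 0) = 1)
    ↔ (l.map pvTerm).sum = 1 := by
  induction l with
  | nil => simp
  | cons x l ih =>
    by_cases hx : 0 < x
    · have hbc : 0 < PySem.Int.bitCount x := pv_bitCount_pos x.toNat x le_rfl hx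
      have hs : 0 ≤ (l.map pvTerm).sum := List.sum_nonneg (by
        intro a ha; obtain ⟨b, _, rfl⟩ := List.mem_map.mp ha; exact pv_term_nonneg b)
      have hz := pv_sum_zero_iff l
      simp only [List.filter_cons, hx, decide_true, if_true, List.map_cons, List.sum_cons,
        List.length_cons, List.getD_cons_zero, pvTerm]
      constructor
      · rintro ⟨h1, h2⟩
        have : l.filter (fun x => decide (0 < x)) = [] := by
          cases hfl : l.filter (fun x => decide (0 < x)) with
          | nil => rfl
          | cons a t => rw [hfl] at h1; simp at h1
        rw [(hz.mpr this)] at *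
        omega
      · intro h1
        have hb1 : (PySem.Int.bitCount x : Int) = 1 ∧ (l.map pvTerm).sum = 0 := by omega
        have := hz.mp hb1.2
        simp [this]
        omega
    · simp only [List.filter_cons, hx, decide_false, if_false, List.map_cons, List.sum_cons,
        pvTerm]
      simpa using ih

-- B's while loop computes the sum of pvTerm over the mirrored pairs
lemma pv_pairTotal_spec (values : List Int) :
    ∀ (m : Nat) (j k total : Int),
      (min (j + 1) ((values.length : Int) - k)).toNat = m →
      pvPairTotal values j k total = total +
        ((List.range m).map (fun (t : Nat) =>
          pvTerm (PySem.Int.bxor (PySem.List.pyGetD values (j - (t : Int)) 0)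
            (PySem.List.pyGetD values (k + (t : Int)) 0)))).sum := by
  intro m
  induction m with
  | zero =>
    intro j k total hm
    rw [pvPairTotal, dif_neg (by omega)]
    simp
  | succ m ih =>
    intro j k total hm
    rw [pvPairTotal, dif_pos (by omega)]
    rw [ih (j - 1) (k + 1) _ (by omega)]
    rw [List.range_succ_eq_map, List.map_cons, List.map_map, List.sum_cons]
    have hfe : ((fun (t : Nat) =>
          pvTerm (PySem.Int.bxor (PySem.List.pyGetD values (j - (t : Int)) 0)
            (PySem.List.pyGetD values (k + (t : Int)) 0))) ∘ Nat.succ) =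
        (fun (t : Nat) =>
          pvTerm (PySem.Int.bxor (PySem.List.pyGetD values (j - 1 - (t : Int)) 0)
            (PySem.List.pyGetD values (k + 1 + (t : Int)) 0))) := by
      funext t
      simp only [Function.comp_apply]
      congr 3 <;> push_cast <;> ring
    rw [hfe]
    simp only [Nat.cast_zero, sub_zero, add_zero, pvTerm]
    split <;> ring

set_option maxHeartbeats 1000000 in
lemma pv_main (values : List Int) (old_value : Int) :
    find_smudge_mirror_ex_py values old_value = find_smudge_mirror_ex_py_alt values old_value := by
  unfold find_smudge_mirror_ex_py find_smudge_mirror_ex_py_alt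
  apply PySem.List.foldl_congr_mem
  intro r i hi
  rw [PySem.List.mem_pyRange_one] at hi
  obtain ⟨hi0, hi1⟩ := hi
  have hn2 : 2 ≤ values.length := by omega
  set it := i.toNat with hit
  have hiit : i = (it : Int) := by omega
  set m := min (it + 1) (values.length - 1 - it) with hm
  have hitems : min (i + 1) ((values.length : Int) - i - 1) = (m : Int) := by omega
  have hrhs : PySem.List.slice values (some (i + 1)) (some (i + 1 + (m : Int)))
      = (values.drop (it + 1)).take m := by
    have e1 : i + 1 = ((it + 1 : Nat) : Int) := by omega
    have e2 : i + 1 + (m : Int) = ((it + 1 + m : Nat) : Int) := by push_cast; omega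
    rw [e2, e1, PySem.List.slice_natCast]
    congr 1
    omega
  have hlhs : PySem.List.slice values (some (i - (m : Int) + 1)) (some (i + 1))
      = (values.drop (it + 1 - m)).take m := by
    have e1 : i - (m : Int) + 1 = ((it + 1 - m : Nat) : Int) := by omega
    have e2 : i + 1 = ((it + 1 : Nat) : Int) := by omega
    rw [e1, e2, PySem.List.slice_natCast]
    congr 1
    omega
  have hrl : ((values.drop (it + 1)).take m).length = m := by
    simp only [List.length_take, List.length_drop]
    omega
  have hcl : ((values.drop (it + 1 - m)).take m).length = m := by
    simp only [List.length_take, List.length_drop]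
    omega
  have helem_r : ∀ t < m, ((values.drop (it + 1)).take m).getD t 0 = values.getD (it + 1 + t) 0 := by
    intro t ht
    simp [List.getD_eq_getElem?_getD, List.getElem?_drop, ht]
  have helem_l : ∀ t < m,
      (((values.drop (it + 1 - m)).take m).reverse).getD t 0 = values.getD (it - t) 0 := by
    intro t ht
    have h1 : t < ((values.drop (it + 1 - m)).take m).length := by rw [hcl]; exact ht
    rw [List.getD_eq_getElem?_getD, List.getElem?_reverse h1, hcl]
    simp only [List.getElem?_take, List.getElem?_drop]
    rw [if_pos (by omega), List.getD_eq_getElem?_getD]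
    congr 2
    omega
  have htot : pvPairTotal values i (i + 1) 0 =
      ((List.range m).map (fun (t : Nat) =>
        pvTerm (PySem.Int.bxor (values.getD (it - t) 0) (values.getD (it + 1 + t) 0)))).sum := by
    rw [pv_pairTotal_spec values m i (i + 1) 0 (by omega), zero_add]
    refine congrArg List.sum ?_
    apply List.map_congr_left
    intro t ht
    rw [List.mem_range] at ht
    have e1 : i - (t : Int) = ((it - t : Nat) : Int) := by omega
    have e2 : i + 1 + (t : Int) = ((it + 1 + t : Nat) : Int) := by omega
    rw [e1, e2, PySem.List.pyGetD_natCast, PySem.List.pyGetD_natCast]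
  dsimp only
  rw [hitems, hlhs, hrhs, hrl]
  have hxl : ((PySem.List.pyRange 0 ((m : Nat) : Int) 1).map
        (fun t => PySem.Int.bxor (PySem.List.pyGetD (((values.drop (it + 1 - m)).take m).reverse) t 0)
          (PySem.List.pyGetD ((values.drop (it + 1)).take m) t 0)))
      = (List.range m).map (fun (t : Nat) =>
          PySem.Int.bxor (values.getD (it - t) 0) (values.getD (it + 1 + t) 0)) := by
    rw [PySem.List.pyRange_one, List.map_map]
    have : ((m : Int) - 0).toNat = m := by omega
    rw [this]
    apply List.map_congr_left
    intro t ht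
    rw [List.mem_range] at ht
    simp only [Function.comp_apply, zero_add]
    rw [PySem.List.pyGetD_natCast, PySem.List.pyGetD_natCast, helem_l t ht, helem_r t ht]
  rw [hxl, PySem.List.pyGetD_zero, htot]
  have hc := pv_cond_iff ((List.range m).map (fun (t : Nat) =>
      PySem.Int.bxor (values.getD (it - t) 0) (values.getD (it + 1 + t) 0)))
  simp only [List.map_map] at hc
  split_ifs <;> tauto

-- ===== VERDICT (by name: the statement is the Claim_ definition above) =====
theorem find_smudge_mirror_ex_py_spec : Claim_equal_find_smudge_mirror_ex_py := by
  intro values old_value _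
  exact pv_main values old_value
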